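-- pv_equiv track=rewrite | github.com/Aavash232311/transformer-pt-analysis | utils/load_pipeline.py | generate_pairs_start_point
-- ===== SOURCE A (Python) =====
-- def generate_pairs_start_point(x, y, mod=10, seq_length=20):
--
--     seq = [x, y]
--
--     while len(seq) < seq_length:
--         seq.append((seq[-1] - seq[-2]) % mod)
--
--     points = []
--     for i in range(0, len(seq)):
--         fa = seq[i]
--
--         if i + 1 >= len(seq):
--             break
--
--         fb = seq[i + 1]
--         points.append((fa, fb))
--
--         if fa == seq[0] and fb == seq[1] and i > 0:
--             break # end of the loop
--
--     return points
-- ===== SOURCE B (Python) =====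
-- def generate_pairs_start_point(x, y, mod=10, seq_length=20):
--     # Streaming: generate the recurrence lazily, emitting each adjacent pair
--     # as soon as its two members exist; never materializes the full sequence.
--     L = max(seq_length, 2)
--     points = []
--     a, b = x, y
--     for i in range(L - 1):
--         points.append((a, b))
--         if i > 0 and a == x and b == y:
--             break
--         if i + 1 < L - 1:
--             a, b = b, (b - a) % mod
--     return points
-- ===== Notes on version B (the rewrite author's own statement) =====
-- stated objective: faster
-- what changed: B fuses A's two phases (materialize the whole sequence, then scan it for adjacent pairs) into one streaming loop keeping only the last two values, emitting each pair as generated and stopping generation at the cycle, so it never builds the full sequence.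
import Mathlib
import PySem

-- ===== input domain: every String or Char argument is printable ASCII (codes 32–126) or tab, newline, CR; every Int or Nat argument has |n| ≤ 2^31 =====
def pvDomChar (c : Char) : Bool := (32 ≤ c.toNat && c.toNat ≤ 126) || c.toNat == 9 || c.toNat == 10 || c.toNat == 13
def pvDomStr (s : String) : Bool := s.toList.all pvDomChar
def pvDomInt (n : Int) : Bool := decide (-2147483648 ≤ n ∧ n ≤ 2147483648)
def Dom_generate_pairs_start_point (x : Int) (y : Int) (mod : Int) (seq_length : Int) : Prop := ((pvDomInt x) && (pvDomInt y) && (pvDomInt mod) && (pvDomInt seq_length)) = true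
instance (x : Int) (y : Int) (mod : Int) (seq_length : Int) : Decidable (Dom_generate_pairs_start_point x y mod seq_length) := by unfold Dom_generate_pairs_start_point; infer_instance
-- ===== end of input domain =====

-- B fuses A's build-then-scan into one streaming loop that stops generating at the cycle (measured faster on large seq_length); equal return values proved for mod ≠ 0 (or seq_length ≤ 2, where no modulus is taken).


-- ===== PORT A =====
-- 'while len(seq) < seq_length: seq.append((seq[-1] - seq[-2]) % mod)': fuel = number of appends
def pvBuildA (seq_length : Int) (mod : Int) (seq : List Int) : Nat → List Int
  | 0 => seq
  | fuel + 1 =>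
    if (seq.length : Int) < seq_length then
      pvBuildA seq_length mod
        (seq ++ [PySem.Int.mod ((PySem.List.pyGet? seq (-1)).getD 0 - (PySem.List.pyGet? seq (-2)).getD 0) mod]) fuel
    else seq

-- 'for i in range(0, len(seq)): …' with the two breaks
def pvPairsA (seq : List Int) (i : Nat) (points : List (Int × Int)) : List (Int × Int) :=
  if h : i < seq.length then
    let fa := seq[i]
    if i + 1 ≥ seq.length then points
    else
      let fb := (seq[i+1]?).getD 0
      let points := points ++ [(fa, fb)]
      if fa = (seq[0]?).getD 0 ∧ fb = (seq[1]?).getD 0 ∧ i > 0 then points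
      else pvPairsA seq (i + 1) points
  else points
termination_by seq.length - i

def generate_pairs_start_point (x : Int) (y : Int) (mod : Int) (seq_length : Int) : List (Int × Int) :=
  let seq := pvBuildA seq_length mod [x, y] (seq_length - 2).toNat
  pvPairsA seq 0 []

-- ===== PORT B =====
-- Source B's single loop 'for i in range(L - 1)' with its two breaks and window slide
def pvLoopB (x y mod : Int) (Lm1 : Nat) (i : Nat) (a b : Int) (points : List (Int × Int)) : List (Int × Int) :=
  if i < Lm1 then
    let points := points ++ [(a, b)]
    if i > 0 ∧ a = x ∧ b = y then points
    else if i + 1 < Lm1 then pvLoopB x y mod Lm1 (i + 1) b (PySem.Int.mod (b - a) mod) points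
    else points
  else points
termination_by Lm1 - i

def generate_pairs_start_point_alt (x : Int) (y : Int) (mod : Int) (seq_length : Int) : List (Int × Int) :=
  pvLoopB x y mod ((max seq_length 2) - 1).toNat 0 x y []

-- ===== PRECONDITION & SPEC =====
-- Pre_ excludes exactly the inputs where Python A raises ZeroDivisionError ('% 0', reached iff seq_length ≥ 3); B raises there too.
def Pre_generate_pairs_start_point (_x : Int) (_y : Int) (mod : Int) (seq_length : Int) : Prop :=
  mod ≠ 0 ∨ seq_length ≤ 2
instance (x : Int) (y : Int) (mod : Int) (seq_length : Int) : Decidable (Pre_generate_pairs_start_point x y mod seq_length) := by unfold Pre_generate_pairs_start_point; infer_instance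

def pvWitness_generate_pairs_start_point : Int × Int × Int × Int := (1, 2, 10, 20)

def Spec_generate_pairs_start_point (x : Int) (y : Int) (mod : Int) (seq_length : Int) (out : List (Int × Int)) : Prop := out = generate_pairs_start_point_alt x y mod seq_length
instance (x : Int) (y : Int) (mod : Int) (seq_length : Int) (out : List (Int × Int)) : Decidable (Spec_generate_pairs_start_point x y mod seq_length out) := by unfold Spec_generate_pairs_start_point; infer_instance

-- ===== CLAIM (what is proved, stated in full; the proofs are below) =====
def Claim_equal_generate_pairs_start_point : Prop := ∀ (x : Int) (y : Int) (mod : Int) (seq_length : Int), Dom_generate_pairs_start_point x y mod seq_length → Pre_generate_pairs_start_point x y mod seq_length → Spec_generate_pairs_start_point x y mod seq_length (generate_pairs_start_point x y mod seq_length)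

-- ===== LEMMAS AND PROOFS =====

-- the mathematical recurrence both programs follow
def pvSeqF (x y mod : Int) : Nat → Int
  | 0 => x
  | 1 => y
  | n + 2 => PySem.Int.mod (pvSeqF x y mod (n + 1) - pvSeqF x y mod n) mod

lemma pvBuildA_inv (x y mod seq_length : Int) :
    ∀ (fuel k : Nat), 2 ≤ k → (k : Int) + fuel = max seq_length 2 →
      pvBuildA seq_length mod ((List.range k).map (pvSeqF x y mod)) fuel
        = (List.range ((max seq_length 2).toNat)).map (pvSeqF x y mod) := by
  intro fuel
  induction fuel with
  | zero =>
    intro k hk hsum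
    simp only [Nat.cast_zero, add_zero] at hsum
    have : (max seq_length 2).toNat = k := by omega
    simp [pvBuildA, this]
  | succ n ih =>
    intro k hk hsum
    have hlt : (k : Int) < seq_length := by
      have := le_max_left seq_length 2
      omega
    have hkpos : 0 < k := by omega
    rw [pvBuildA]
    have hlen : ((List.range k).map (pvSeqF x y mod)).length = k := by simp
    rw [if_pos (by rw [hlen]; exact_mod_cast hlt)]
    have hget1 : (PySem.List.pyGet? ((List.range k).map (pvSeqF x y mod)) (-1)).getD 0
        = pvSeqF x y mod (k - 1) := by
      rw [PySem.List.pyGet?_neg_one, List.getLast?_eq_getElem?]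
      simp [hlen, Nat.sub_lt hkpos]
    have hget2 : (PySem.List.pyGet? ((List.range k).map (pvSeqF x y mod)) (-2)).getD 0
        = pvSeqF x y mod (k - 2) := by
      rw [show (-2 : Int) = -((2 : Nat) : Int) by norm_num,
        PySem.List.pyGet?_neg_natCast _ 2 (by norm_num) (by rw [hlen]; exact hk)]
      simp [hlen, show k - 2 < k by omega]
    rw [hget1, hget2]
    have hstep : (List.range k).map (pvSeqF x y mod)
        ++ [PySem.Int.mod (pvSeqF x y mod (k - 1) - pvSeqF x y mod (k - 2)) mod]
        = (List.range (k + 1)).map (pvSeqF x y mod) := by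
      rw [List.range_succ, List.map_append]
      congr 1
      simp only [List.map_cons, List.map_nil]
      congr 1
      have hk2 : k = (k - 2) + 2 := by omega
      rw [hk2, pvSeqF]
      congr 2

    rw [hstep]
    exact ih (k + 1) (by omega) (by push_cast; omega)

lemma pvSeq_get (x y mod : Int) (L : Nat) (j : Nat) (h : j < L) :
    (((List.range L).map (pvSeqF x y mod))[j]?).getD 0 = pvSeqF x y mod j := by
  simp [h]

lemma pvLoops_eq (x y mod : Int) (L : Nat) (hL : 2 ≤ L) :
    ∀ (i : Nat) (pts : List (Int × Int)),
      pvPairsA ((List.range L).map (pvSeqF x y mod)) i pts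
        = pvLoopB x y mod (L - 1) i (pvSeqF x y mod i) (pvSeqF x y mod (i + 1)) pts := by
  have key : ∀ (n i : Nat) (pts : List (Int × Int)), L - i = n →
      pvPairsA ((List.range L).map (pvSeqF x y mod)) i pts
        = pvLoopB x y mod (L - 1) i (pvSeqF x y mod i) (pvSeqF x y mod (i + 1)) pts := by
    intro n
    induction n using Nat.strong_induction_on with
    | _ n ih =>
      intro i pts hn
      have hlen : ((List.range L).map (pvSeqF x y mod)).length = L := by simp
      rw [pvPairsA, pvLoopB]
      by_cases h1 : i + 1 < L
      · have hiL : i < L := by omega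
        rw [dif_pos (by rw [hlen]; omega)]
        rw [if_neg (by rw [hlen]; omega)]
        rw [if_pos (show i < L - 1 by omega)]
        have e0 : ((List.range L).map (pvSeqF x y mod))[0]?.getD 0 = x :=
          pvSeq_get x y mod L 0 (by omega)
        have e1 : ((List.range L).map (pvSeqF x y mod))[1]?.getD 0 = y :=
          pvSeq_get x y mod L 1 (by omega)
        have ei : ((List.range L).map (pvSeqF x y mod))[i] = pvSeqF x y mod i := by
          simp
        have ei1 : ((List.range L).map (pvSeqF x y mod))[i+1]?.getD 0 = pvSeqF x y mod (i + 1) :=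
          pvSeq_get x y mod L (i + 1) h1
      
        simp only [ei, ei1, e0, e1]
        by_cases hbrk : pvSeqF x y mod i = x ∧ pvSeqF x y mod (i + 1) = y ∧ i > 0
        · rw [if_pos hbrk, if_pos ⟨hbrk.2.2, hbrk.1, hbrk.2.1⟩]
        · rw [if_neg hbrk, if_neg (by tauto)]
          by_cases h2 : i + 2 < L
          · rw [if_pos (show i + 1 < L - 1 by omega)]
            rw [ih (L - (i + 1)) (by omega) (i + 1) _ rfl]
            congr 1
          · rw [if_neg (show ¬ (i + 1 < L - 1) by omega)]
            -- pvPairsA at i+1 immediately stops: i+2 ≥ L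
            rw [pvPairsA]
            rw [dif_pos (by rw [hlen]; omega), if_pos (by rw [hlen]; omega)]
      · -- i + 1 ≥ L: A-side returns pts (either i ≥ len, or via the i+1 ≥ len stop); B-side: i ≥ L - 1
        rw [if_neg (show ¬ (i < L - 1) by omega)]
        by_cases h0 : i < L
        · rw [dif_pos (by rw [hlen]; omega), if_pos (by rw [hlen]; omega)]
        · rw [dif_neg (by rw [hlen]; omega)]
  intro i pts
  exact key (L - i) i pts rfl

lemma pvBuild_eq (x y mod seq_length : Int) :
    pvBuildA seq_length mod [x, y] (seq_length - 2).toNat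
      = (List.range ((max seq_length 2).toNat)).map (pvSeqF x y mod) := by
  have h2 : ([x, y] : List Int) = (List.range 2).map (pvSeqF x y mod) := by
    simp [List.range_succ, pvSeqF]
  rw [h2]
  exact pvBuildA_inv x y mod seq_length (seq_length - 2).toNat 2 (by omega) (by omega)

-- ===== VERDICT (by name: the statement is the Claim_ definition above) =====
theorem generate_pairs_start_point_spec : Claim_equal_generate_pairs_start_point := by
  intro x y mod seq_length _ _
  unfold Spec_generate_pairs_start_point generate_pairs_start_point generate_pairs_start_point_alt
  rw [pvBuild_eq]
  have hL : 2 ≤ (max seq_length 2).toNat := by omega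
  rw [pvLoops_eq x y mod _ hL 0 []]
  have : ((max seq_length 2) - 1).toNat = (max seq_length 2).toNat - 1 := by omega
  rw [this]
  norm_num [pvSeqF]
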